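-- pv_equiv track=rewrite | github.com/MrBrantCode/unitest_baseline | mut_generate/mist_train_taco/taco_14346/solution.py | max_moves_for_final_X
-- ===== SOURCE A (Python) =====
-- def max_moves_for_final_X(T: int, X_f: list) -> list:
--     """
--     Calculate the maximum number of moves Chef could have made given the final value of X for each test case.
--
--     Parameters:
--     - T (int): The number of test cases.
--     - X_f (list): A list of integers where each integer represents the final value of X for a test case.
--
--     Returns:
--     - list: A list of integers where each integer represents the maximum number of moves for the corresponding test case.
--     """
--
--     def bs(val, l):
--         i = 0
--         j = len(l) - 1
--         ans = -1
--         while i <= j: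
--             mid = i + (j - i) // 2
--             if l[mid] <= val:
--                 ans = mid
--                 i = mid + 1
--             else:
--                 j = mid - 1
--         return ans + 1
--
--     def bst(i, val):
--         j = 100000000000
--         ans = -1
--         while i <= j:
--             mid = i + (j - i) // 2
--             if mid ** 2 > val:
--                 ans = mid
--                 j = mid - 1
--             else:
--                 i = mid + 1
--         return ans
--
--     e = 10 ** 9
--     l = [1]
--     sum = 1
--     while l[-1] <= e:
--         x = bst(l[-1] + 1, sum)
--         sum += x ** 2
--         l.append(x)
--
--     results = []
--     for n in X_f:
--         results.append(bs(n, l))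
--
--     return results
-- ===== SOURCE B (Python) =====
-- import math
--
--
-- def max_moves_for_final_X(T: int, X_f: list) -> list:
--     """No precomputed threshold list and no binary search: each query is
--     answered by directly simulating Chef's moves (x, sum) with a closed-form
--     isqrt step, counting moves while x <= n."""
--     def moves(n):
--         x, s, cnt = 1, 1, 0
--         while x <= n:
--             cnt += 1
--             if x > 10 ** 9:
--                 break
--             x = math.isqrt(s) + 1
--             s += x * x
--         return cnt
--     return [moves(n) for n in X_f]
-- ===== Notes on version B (the rewrite author's own statement) =====
-- stated objective: alternative
-- what changed: B drops A's precomputed threshold list and both hand-rolled binary searches entirely: each query is answered by directly simulating the move sequence (x, sum) with a closed-form isqrt step, counting moves while x <= n.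
import Mathlib
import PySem

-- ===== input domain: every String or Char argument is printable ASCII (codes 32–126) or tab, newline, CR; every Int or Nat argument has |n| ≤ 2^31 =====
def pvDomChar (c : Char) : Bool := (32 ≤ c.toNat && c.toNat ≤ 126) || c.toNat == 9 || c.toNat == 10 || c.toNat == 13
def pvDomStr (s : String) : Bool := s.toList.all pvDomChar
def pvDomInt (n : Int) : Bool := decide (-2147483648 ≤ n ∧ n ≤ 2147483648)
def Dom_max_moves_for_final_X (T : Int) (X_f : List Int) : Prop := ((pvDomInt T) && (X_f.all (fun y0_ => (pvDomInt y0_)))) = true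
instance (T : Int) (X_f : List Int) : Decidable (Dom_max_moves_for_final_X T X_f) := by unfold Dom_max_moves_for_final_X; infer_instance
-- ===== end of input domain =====

-- B drops A's precomputed threshold list and both binary searches: each query is answered by
-- directly simulating the move sequence (x, sum) with a closed-form isqrt step (alternative).

-- ===== PORT A =====
-- A's inner 'bs' while-loop (query binary search); its indices stay in range, so pyGetD is exact.
def pyBsLoop (val : Int) (l : List Int) (i j ans : Int) : Int :=
  if i ≤ j then
    let mid := i + PySem.Int.floordiv (j - i) 2
    if PySem.List.pyGetD l mid 0 ≤ val then
      pyBsLoop val l (mid + 1) j mid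
    else
      pyBsLoop val l i (mid - 1) ans
  else ans
termination_by (j + 1 - i).toNat
decreasing_by
  · have h2 : PySem.Int.floordiv (j - i) 2 = (j - i) / 2 :=
      PySem.Int.floordiv_eq_ediv_of_pos (by omega)
    simp only [h2] at *; omega
  · have h2 : PySem.Int.floordiv (j - i) 2 = (j - i) / 2 :=
      PySem.Int.floordiv_eq_ediv_of_pos (by omega)
    simp only [h2] at *; omega

-- 'return ans + 1' after the loop
def pyBs (val : Int) (l : List Int) : Int :=
  pyBsLoop val l 0 ((l.length : Int) - 1) (-1) + 1

-- A's inner 'bst' while-loop.  The fuel only guards totality: the interval [i, j] at least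
-- halves each step, so fuel 100 > log2(10^11) is never exhausted on A's calls.
def pyBstLoop : Nat → Int → Int → Int → Int → Int
  | 0, _, _, ans, _ => ans
  | f + 1, i, j, ans, val =>
    if i ≤ j then
      let mid := i + PySem.Int.floordiv (j - i) 2
      if mid ^ 2 > val then
        pyBstLoop f i (mid - 1) mid val
      else
        pyBstLoop f (mid + 1) j ans val
    else ans

-- A's outer while-loop.  The fuel 100 is only a totality guard: the loop exits through its own
-- condition after 59 iterations (the appended values at least double every two steps), so the
-- fuel is never exhausted.
def buildA : Nat → List Int → Int → List Int
  | 0, l, _ => l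
  | f + 1, l, s =>
    if PySem.List.pyGetD l (-1) 0 ≤ 1000000000 then
      let x := pyBstLoop 100 (PySem.List.pyGetD l (-1) 0 + 1) 100000000000 (-1) s
      buildA f (l ++ [x]) (s + x ^ 2)
    else l

def max_moves_for_final_X (T : Int) (X_f : List Int) : List Int :=
  let l := buildA 100 [1] 1
  X_f.map (fun n => pyBs n l)

-- ===== PORT B =====
-- Source B's per-query 'while x <= n' loop.  math.isqrt(s) on the nonnegative running sum is
-- Nat.sqrt.  The fuel is only a totality guard: the simulated x exceeds 10^9 after at most
-- 60 advances (the running sum more than doubles each step), so with fuel 100, fuel 0 can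
-- only be reached with x > 10^9, where the Python loop body runs at most once more and the
-- base case below is exactly that last iteration.
def movesLoop : Nat → Int → Int → Int → Int → Int
  | 0, x, _, cnt, n => if x ≤ n then cnt + 1 else cnt
  | f + 1, x, s, cnt, n =>
    if x ≤ n then
      if x > 1000000000 then cnt + 1
      else
        let x' : Int := (Nat.sqrt s.toNat : Int) + 1
        movesLoop f x' (s + x' * x') (cnt + 1) n
    else cnt

def max_moves_for_final_X_alt (T : Int) (X_f : List Int) : List Int :=
  X_f.map (fun n => movesLoop 100 1 1 0 n)

-- ===== PRECONDITION & SPEC =====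
def Spec_max_moves_for_final_X (T : Int) (X_f : List Int) (out : List Int) : Prop := out = max_moves_for_final_X_alt T X_f
instance (T : Int) (X_f : List Int) (out : List Int) : Decidable (Spec_max_moves_for_final_X T X_f out) := by unfold Spec_max_moves_for_final_X; infer_instance

-- ===== CLAIM (what is proved, stated in full; the proofs are below) =====
def Claim_equal_max_moves_for_final_X : Prop := ∀ (T : Int) (X_f : List Int), Dom_max_moves_for_final_X T X_f → Spec_max_moves_for_final_X T X_f (max_moves_for_final_X T X_f)

-- ===== LEMMAS AND PROOFS =====

-- The (cons-form) sequence of move values starting from value x with running sum s.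
def gen : Nat → Int → Int → List Int
  | 0, x, _ => [x]
  | f + 1, x, s =>
    if x ≤ 1000000000 then
      let x' : Int := (Nat.sqrt s.toNat : Int) + 1
      x :: gen f x' (s + x' * x')
    else [x]

-- 'bst' binary search returns t, the least integer whose square exceeds val, whenever
-- i ≤ t and (t ≤ j or ans is already t), given enough fuel for the halving interval.
theorem pyBstLoop_eq (fuel : Nat) (i j ans t val : Int)
    (hfuel : (j + 1 - i).toNat < 2 ^ fuel)
    (hit : i ≤ t)
    (hcase : t ≤ j ∨ ans = t)
    (hup : ∀ k : Int, t ≤ k → k ^ 2 > val)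
    (hdn : ∀ k : Int, i ≤ k → k < t → ¬ (k ^ 2 > val)) :
    pyBstLoop fuel i j ans val = t := by
  induction fuel generalizing i j ans with
  | zero =>
    simp only [pow_zero, Nat.lt_one_iff] at hfuel
    rcases hcase with hc | hc
    · omega
    · simp [pyBstLoop, hc]
  | succ f ih =>
    rw [pyBstLoop]
    by_cases hij : i ≤ j
    · simp only [hij, if_true]
      have hfd : PySem.Int.floordiv (j - i) 2 = (j - i) / 2 :=
        PySem.Int.floordiv_eq_ediv_of_pos (by omega)
      rw [hfd]
      set mid := i + (j - i) / 2 with hmid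
      have hmid1 : i ≤ mid := by omega
      have hmid2 : mid ≤ j := by omega
      have hpow : (2 : Nat) ^ (f + 1) = 2 ^ f + 2 ^ f := by rw [pow_succ]; omega
      by_cases hP : mid ^ 2 > val
      · simp only [hP, if_true]
        have htm : t ≤ mid := by
          by_contra hc
          exact hdn mid hmid1 (by omega) hP
        exact ih i (mid - 1) mid (by omega) hit (by omega) hdn
      · simp only [hP, if_false]
        have hmt : mid < t := by
          by_contra hc
          exact hP (hup mid (by omega))
        exact ih (mid + 1) j ans (by omega) (by omega) hcase
          (fun k hk1 hk2 => hdn k (by omega) hk2)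
    · simp only [hij, if_false]
      rcases hcase with h | h
      · omega
      · exact h

-- One step agrees: on a nonnegative sum s with last² ≤ s < 2·last² ≤ 2·10¹⁸,
-- A's bst call returns exactly isqrt(s)+1.
theorem bst_step (last s : Int) (h1 : 1 ≤ last) (hle : last ≤ 1000000000)
    (hs1 : last ^ 2 ≤ s) (hs2 : s < 2 * last ^ 2) :
    pyBstLoop 100 (last + 1) 100000000000 (-1) s = (Nat.sqrt s.toNat : Int) + 1 := by
  have hs0 : 0 ≤ s := le_trans (by positivity) hs1
  have hsn : ((s.toNat : Int)) = s := Int.toNat_of_nonneg hs0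
  set r : Nat := Nat.sqrt s.toNat with hr
  -- r² ≤ s < (r+1)²
  have hr1 : (r : Int) ^ 2 ≤ s := by
    have h := Nat.sqrt_le' s.toNat
    have h2 : (((r ^ 2 : Nat)) : Int) ≤ ((s.toNat : Int)) := by exact_mod_cast h
    push_cast at h2; omega
  have hr2 : s < ((r : Int) + 1) ^ 2 := by
    have h := Nat.lt_succ_sqrt' s.toNat
    have h2 : ((s.toNat : Int)) < (((r.succ ^ 2 : Nat)) : Int) := by exact_mod_cast h
    push_cast at h2; omega
  -- last ≤ r  (since last² ≤ s and 0 ≤ last)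
  have hln : ((last.toNat : Int)) = last := Int.toNat_of_nonneg (by omega)
  have hlr : last ≤ (r : Int) := by
    have hl : last.toNat * last.toNat ≤ s.toNat := by
      zify
      rw [hln, hsn]
      nlinarith
    have := (Nat.le_sqrt).mpr hl
    omega
  -- r < 2·10⁹  (since s < 2·10¹⁸)
  have hrb : (r : Int) < 2000000000 := by
    have h4 : s < 4000000000000000000 := by nlinarith
    have hsb : s.toNat < 2000000000 ^ 2 := by
      calc s.toNat < 4000000000000000000 := by omega
        _ = 2000000000 ^ 2 := by norm_num
    have := (Nat.sqrt_lt').mpr hsb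
    omega
  apply pyBstLoop_eq
  · -- fuel: interval length ≤ 10¹¹ + 1 < 2¹⁰⁰
    have : (100000000000 + 1 - (last + 1)).toNat ≤ 100000000000 := by omega
    calc (100000000000 + 1 - (last + 1)).toNat ≤ 100000000000 := this
      _ < 2 ^ 100 := by norm_num
  · omega
  · left; omega
  · intro k hk
    have h0t : (0 : Int) ≤ (r : Int) + 1 := by positivity
    nlinarith
  · intro k hk1 hk2
    have : k ^ 2 ≤ (r : Int) ^ 2 := by nlinarith
    rw [not_lt]
    nlinarith

-- A's builder equals (what remains of) the abstract sequence gen, under the loop invariant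
-- 1 ≤ last, last² ≤ s < 2·last².
theorem buildA_eq_gen (fuel : Nat) (l : List Int) (s : Int) (h : l ≠ [])
    (hlast1 : 1 ≤ l.getLast h) (hs1 : (l.getLast h) ^ 2 ≤ s) (hs2 : s < 2 * (l.getLast h) ^ 2) :
    buildA fuel l s = l.dropLast ++ gen fuel (l.getLast h) s := by
  induction fuel generalizing l s with
  | zero =>
    rw [buildA, gen]
    exact (List.dropLast_append_getLast h).symm
  | succ f ih =>
    rw [buildA, gen]
    have hg : PySem.List.pyGetD l (-1) 0 = l.getLast h := PySem.List.pyGetD_neg_one l 0 h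
    rw [hg]
    by_cases hc : l.getLast h ≤ 1000000000
    · simp only [hc, if_true]
      set x : Int := (Nat.sqrt s.toNat : Int) + 1 with hx
      have hbst : pyBstLoop 100 (l.getLast h + 1) 100000000000 (-1) s = x :=
        bst_step (l.getLast h) s hlast1 hc hs1 hs2
      rw [hbst]
      have hs0 : 0 ≤ s := le_trans (by positivity) hs1
      have hsn : ((s.toNat : Int)) = s := Int.toNat_of_nonneg hs0
      have hx1 : 1 ≤ x := by
        have : (0 : Int) ≤ (Nat.sqrt s.toNat : Int) := by positivity
        omega
      have hxs : s < x ^ 2 := by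
        have h2 : ((s.toNat : Int)) < ((((Nat.sqrt s.toNat).succ ^ 2 : Nat)) : Int) := by
          exact_mod_cast Nat.lt_succ_sqrt' s.toNat
        push_cast at h2
        rw [hx]; nlinarith
      have hne : l ++ [x] ≠ [] := by simp
      have hlast' : (l ++ [x]).getLast hne = x := by simp
      have := ih (l ++ [x]) (s + x ^ 2) hne
        (by rw [hlast']; omega)
        (by rw [hlast']; nlinarith)
        (by rw [hlast']; nlinarith)
      rw [this, hlast']
      have hdrop : (l ++ [x]).dropLast = l := by simp
      rw [hdrop]
      have hsq : x ^ 2 = x * x := sq x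
      rw [hsq]
      have hrhs : l.dropLast ++ l.getLast h :: gen f ((Nat.sqrt s.toNat : Int) + 1) (s + ((Nat.sqrt s.toNat : Int) + 1) * ((Nat.sqrt s.toNat : Int) + 1))
          = (l.dropLast ++ [l.getLast h]) ++ gen f ((Nat.sqrt s.toNat : Int) + 1) (s + ((Nat.sqrt s.toNat : Int) + 1) * ((Nat.sqrt s.toNat : Int) + 1)) := by
        simp
      rw [hrhs, List.dropLast_append_getLast h]
    · simp only [hc, if_false]
      exact (List.dropLast_append_getLast h).symm

-- Every element of gen f x s is ≥ x, given 0 ≤ x and x² ≤ s.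
theorem gen_lower (fuel : Nat) (x s : Int) (hx : 0 ≤ x) (hs : x * x ≤ s) :
    ∀ y ∈ gen fuel x s, x ≤ y := by
  induction fuel generalizing x s with
  | zero => intro y hy; simp [gen] at hy; omega
  | succ f ih =>
    intro y hy
    rw [gen] at hy
    by_cases hc : x ≤ 1000000000
    · simp only [hc, if_true] at hy
      rcases List.mem_cons.mp hy with h | h
      · omega
      · set x' : Int := (Nat.sqrt s.toNat : Int) + 1 with hx'
        have hs0 : 0 ≤ s := le_trans (by positivity) hs
        have hsn : ((s.toNat : Int)) = s := Int.toNat_of_nonneg hs0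
        have hxn : ((x.toNat : Int)) = x := Int.toNat_of_nonneg hx
        have hxr : x ≤ (Nat.sqrt s.toNat : Int) := by
          have hl : x.toNat * x.toNat ≤ s.toNat := by
            zify; rw [hxn, hsn]; nlinarith
          have := (Nat.le_sqrt).mpr hl
          omega
        have hxx' : x < x' := by omega
        have := ih x' (s + x' * x') (by omega) (by nlinarith) y h
        omega
    · simp only [hc, if_false] at hy
      simp at hy; omega

-- gen is sorted (≤), given 0 ≤ x and x² ≤ s.
theorem gen_sorted (fuel : Nat) (x s : Int) (hx : 0 ≤ x) (hs : x * x ≤ s) :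
    (gen fuel x s).Pairwise (· ≤ ·) := by
  induction fuel generalizing x s with
  | zero => simp [gen]
  | succ f ih =>
    rw [gen]
    by_cases hc : x ≤ 1000000000
    · simp only [hc, if_true]
      set x' : Int := (Nat.sqrt s.toNat : Int) + 1 with hx'
      have hs0 : 0 ≤ s := le_trans (by positivity) hs
      have hsn : ((s.toNat : Int)) = s := Int.toNat_of_nonneg hs0
      have hxn : ((x.toNat : Int)) = x := Int.toNat_of_nonneg hx
      have hxr : x ≤ (Nat.sqrt s.toNat : Int) := by
        have hl : x.toNat * x.toNat ≤ s.toNat := by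
          zify; rw [hxn, hsn]; nlinarith
        have := (Nat.le_sqrt).mpr hl
        omega
      have hinv1 : (0 : Int) ≤ x' := by omega
      have hinv2 : x' * x' ≤ s + x' * x' := by nlinarith
      refine List.pairwise_cons.mpr ⟨?_, ih x' (s + x' * x') hinv1 hinv2⟩
      intro y hy
      have := gen_lower f x' (s + x' * x') hinv1 hinv2 y hy
      omega
    · simp only [hc, if_false]; simp

-- B's per-query loop counts exactly the elements of gen that are ≤ n.
theorem movesLoop_eq_countP (fuel : Nat) (x s cnt n : Int) (hx : 0 ≤ x) (hs : x * x ≤ s) :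
    movesLoop fuel x s cnt n = cnt + ((gen fuel x s).countP (fun v => v ≤ n) : Int) := by
  induction fuel generalizing x s cnt with
  | zero =>
    rw [movesLoop, gen]
    by_cases hxn : x ≤ n <;> simp [hxn]
  | succ f ih =>
    rw [movesLoop, gen]
    by_cases hxn : x ≤ n
    · simp only [hxn, if_true]
      by_cases hbig : x > 1000000000
      · have hc : ¬ x ≤ 1000000000 := by omega
        simp [hc, hxn]
      · have hc : x ≤ 1000000000 := by omega
        simp only [hbig, if_false, hc, if_true]
        set x' : Int := (Nat.sqrt s.toNat : Int) + 1 with hx'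
        have hs0 : 0 ≤ s := le_trans (by positivity) hs
        have hsn : ((s.toNat : Int)) = s := Int.toNat_of_nonneg hs0
        have hinv1 : (0 : Int) ≤ x' := by
          have : (0 : Int) ≤ (Nat.sqrt s.toNat : Int) := by positivity
          omega
        have hinv2 : x' * x' ≤ s + x' * x' := by nlinarith
        rw [ih x' (s + x' * x') (cnt + 1) hinv1 hinv2]
        simp [hxn]
        omega
    · simp only [hxn, if_false]
      have hzero : ∀ L : List Int, (∀ y ∈ L, x ≤ y) → L.countP (fun v => v ≤ n) = 0 := by
        intro L hL
        apply List.countP_eq_zero.mpr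
        intro a ha
        have := hL a ha
        simp only [decide_eq_true_eq]
        omega
      by_cases hc : x ≤ 1000000000
      · simp only [hc, if_true]
        set x' : Int := (Nat.sqrt s.toNat : Int) + 1 with hx'
        have hs0 : 0 ≤ s := le_trans (by positivity) hs
        have hsn : ((s.toNat : Int)) = s := Int.toNat_of_nonneg hs0
        have hxn2 : ((x.toNat : Int)) = x := Int.toNat_of_nonneg hx
        have hxr : x ≤ (Nat.sqrt s.toNat : Int) := by
          have hl : x.toNat * x.toNat ≤ s.toNat := by
            zify; rw [hxn2, hsn]; nlinarith
          have := (Nat.le_sqrt).mpr hl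
          omega
        have hinv1 : (0 : Int) ≤ x' := by omega
        have hinv2 : x' * x' ≤ s + x' * x' := by nlinarith
        have htail : ∀ y ∈ gen f x' (s + x' * x'), x ≤ y := by
          intro y hy
          have := gen_lower f x' (s + x' * x') hinv1 hinv2 y hy
          omega
        have hall : ∀ y ∈ x :: gen f x' (s + x' * x'), x ≤ y := by
          intro y hy
          rcases List.mem_cons.mp hy with h | h
          · omega
          · exact htail y h
        rw [hzero _ hall]
        simp
      · simp only [hc, if_false]
        have := hzero [x] (by intro y hy; simp at hy; omega)
        rw [this]
        simp

-- countP of a "≤ val" predicate that holds exactly on the first n positions is n.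
theorem countP_prefix (l : List Int) (val : Int) (n : Nat) (hn : n ≤ l.length)
    (h1 : ∀ (k : Nat) (h : k < l.length), k < n → l[k] ≤ val)
    (h2 : ∀ (k : Nat) (h : k < l.length), n ≤ k → ¬ (l[k] ≤ val)) :
    (l.countP (fun v => v ≤ val) : Int) = (n : Int) := by
  have key : l.countP (fun v => v ≤ val) = n := by
    have hsplit : l.countP (fun v => v ≤ val)
        = (l.take n).countP (fun v => v ≤ val) + (l.drop n).countP (fun v => v ≤ val) := by
      rw [← List.countP_append, List.take_append_drop]
    rw [hsplit]
    have ht : (l.take n).countP (fun v => v ≤ val) = (l.take n).length := by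
      apply List.countP_eq_length.mpr
      intro a ha
      rcases List.mem_iff_getElem.mp ha with ⟨k, hk, rfl⟩
      have hk' : k < l.length := lt_of_lt_of_le hk (by simp)
      have hkn : k < n := by simp at hk; omega
      simp only [List.getElem_take]
      exact decide_eq_true (h1 k hk' hkn)
    have hd : (l.drop n).countP (fun v => v ≤ val) = 0 := by
      apply List.countP_eq_zero.mpr
      intro a ha
      rcases List.mem_iff_getElem.mp ha with ⟨k, hk, rfl⟩
      simp only [List.getElem_drop]
      have hlen : n + k < l.length := by simp at hk; omega
      simp only [decide_eq_true_eq]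
      exact h2 (n + k) hlen (by omega)
    rw [ht, hd]
    simp [List.length_take]
    omega
  exact_mod_cast key

-- 'bs' binary-search invariant: ans = i - 1, everything below i satisfies ≤ val,
-- everything above j does not; then the loop returns (count of elements ≤ val) - 1.
theorem pyBsLoop_inv (val : Int) (l : List Int) (i j : Int)
    (hsort : l.Pairwise (· ≤ ·))
    (h0 : 0 ≤ i) (hij : i ≤ j + 1) (hj : j < (l.length : Int))
    (hpre : ∀ (k : Nat) (h : k < l.length), (k : Int) < i → l[k] ≤ val)
    (hpost : ∀ (k : Nat) (h : k < l.length), j < (k : Int) → ¬ (l[k] ≤ val)) :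
    pyBsLoop val l i j (i - 1) + 1 = (l.countP (fun v => v ≤ val) : Int) := by
  rw [pyBsLoop]
  by_cases hcond : i ≤ j
  · simp only [hcond, if_true]
    have hfd : PySem.Int.floordiv (j - i) 2 = (j - i) / 2 :=
      PySem.Int.floordiv_eq_ediv_of_pos (by omega)
    rw [hfd]
    set mid := i + (j - i) / 2 with hmid
    have hmid1 : i ≤ mid := by omega
    have hmid2 : mid ≤ j := by omega
    have hmidlt : mid.toNat < l.length := by omega
    have hget : PySem.List.pyGetD l mid 0 = l[mid.toNat] :=
      PySem.List.pyGetD_eq_getElem l 0 (by omega) (by omega)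
    rw [hget]
    have hmono : ∀ (a b : Nat) (ha : a < l.length) (hb : b < l.length),
        a ≤ b → l[a] ≤ l[b] := by
      intro a b ha hb hab
      rcases Nat.lt_or_ge a b with h | h
      · exact (List.pairwise_iff_getElem.mp hsort) a b ha hb h
      · have : a = b := by omega
        subst this; rfl
    by_cases hP : l[mid.toNat] ≤ val
    · simp only [hP, if_true]
      have := pyBsLoop_inv val l (mid + 1) j hsort (by omega) (by omega) hj
        (fun k hk hlt => by
          by_cases hki : (k : Int) < i
          · exact hpre k hk hki
          · have hkm : k ≤ mid.toNat := by omega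
            exact le_trans (hmono k mid.toNat hk hmidlt hkm) hP)
        hpost
      have hsimp : mid + 1 - 1 = mid := by omega
      rw [hsimp] at this
      exact this
    · simp only [hP, if_false]
      have := pyBsLoop_inv val l i (mid - 1) hsort h0 (by omega) (by omega)
        hpre
        (fun k hk hgt => by
          have hkm : mid.toNat ≤ k := by omega
          intro hle
          exact hP (le_trans (hmono mid.toNat k hmidlt hk hkm) hle))
      exact this
  · simp only [hcond, if_false]
    have hieq : i = j + 1 := by omega
    have hn : i.toNat ≤ l.length := by omega
    have := countP_prefix l val i.toNat hn
      (fun k hk hkn => hpre k hk (by omega))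
      (fun k hk hkn => hpost k hk (by omega))
    omega
termination_by (j + 1 - i).toNat
decreasing_by
  · omega
  · omega

theorem pyBs_eq_countP (val : Int) (l : List Int) (hsort : l.Pairwise (· ≤ ·)) :
    pyBs val l = (l.countP (fun v => v ≤ val) : Int) := by
  unfold pyBs
  have : (-1 : Int) = 0 - 1 := by norm_num
  rw [this]
  exact pyBsLoop_inv val l 0 ((l.length : Int) - 1) hsort le_rfl (by omega) (by omega)
    (fun k hk hlt => by omega)
    (fun k hk hgt => by omega)

-- A's precomputed list is exactly the abstract sequence gen 100 1 1.
theorem buildA_eq : buildA 100 [1] 1 = gen 100 1 1 := by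
  have h : ([1] : List Int) ≠ [] := by simp
  have hg : ([1] : List Int).getLast h = 1 := rfl
  have := buildA_eq_gen 100 [1] 1 h (by rw [hg]) (by rw [hg]; norm_num) (by rw [hg]; norm_num)
  rw [this, hg]
  rfl

-- ===== VERDICT (by name: the statement is the Claim_ definition above) =====
theorem max_moves_for_final_X_spec : Claim_equal_max_moves_for_final_X := by
  intro T X_f _
  unfold Spec_max_moves_for_final_X max_moves_for_final_X max_moves_for_final_X_alt
  apply List.map_congr_left
  intro n _
  rw [buildA_eq, pyBs_eq_countP n _ (gen_sorted 100 1 1 (by norm_num) (by norm_num)),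
    movesLoop_eq_countP 100 1 1 0 n (by norm_num) (by norm_num)]
  omega
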